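-- pv_equiv track=rewrite | github.com/Abram1111/computer-vision-task2 | activeContour_python/chainCode.py | DriverFunction
-- ===== SOURCE A (Python) =====
-- codeList = [5, 6, 7, 4, -1, 0, 3, 2, 1]
--
-- def getChainCode(x1, y1, x2, y2):
-- 	dx = x2 - x1
-- 	dy = y2 - y1
-- 	hashKey = 3 * dy + dx + 4
-- 	return codeList[hashKey]
--
-- def generateChainCode(ListOfPoints):
-- 	chainCode = []
-- 	for i in range(len(ListOfPoints) - 1):
-- 		a = ListOfPoints[i]
-- 		b = ListOfPoints[i + 1]
-- 		chainCode.append(getChainCode(a[0], a[1], b[0], b[1]))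
-- 	return chainCode
--
-- def Bresenham2D(x1, y1, x2, y2):
-- 	ListOfPoints = []
-- 	ListOfPoints.append([x1, y1])
-- 	xdif = x2 - x1
-- 	ydif = y2 - y1
-- 	dx = abs(xdif)
-- 	dy = abs(ydif)
-- 	if(xdif > 0):
-- 		xs = 1
-- 	else:
-- 		xs = -1
-- 	if (ydif > 0):
-- 		ys = 1
-- 	else:
-- 		ys = -1
-- 	if (dx > dy):
--
-- 		# Driving axis is the X-axis
-- 		p = 2 * dy - dx
-- 		while (x1 != x2):
-- 			x1 += xs
-- 			if (p >= 0):
-- 				y1 += ys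
-- 				p -= 2 * dx
-- 			p += 2 * dy
-- 			ListOfPoints.append([x1, y1])
-- 	else:
--
-- 		# Driving axis is the Y-axis
-- 		p = 2 * dx-dy
-- 		while(y1 != y2):
-- 			y1 += ys
-- 			if (p >= 0):
-- 				x1 += xs
-- 				p -= 2 * dy
-- 			p += 2 * dx
-- 			ListOfPoints.append([x1, y1])
-- 	return ListOfPoints
--
-- def DriverFunction(x_values,y_values):
--     result=''
--     for i in range(0,len(x_values)-1):
--         (x1, y1) = (x_values[i], y_values[i])
--         (x2, y2) = (x_values[i+1], y_values[i+1])
--         ListOfPoints = Bresenham2D(x1, y1, x2, y2)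
--         chainCode    = generateChainCode(ListOfPoints)
--         chainCodeString = "".join(str(e) for e in chainCode)
--         # print ('Chain code for the straight line from', (x1, y1),'to', (x2, y2), 'is', chainCodeString)
--         result=result+chainCodeString
--     return result
-- ===== SOURCE B (Python) =====
-- codeList = [5, 6, 7, 4, -1, 0, 3, 2, 1]
--
-- def DriverFunction(x_values, y_values):
--     # Single fused pass per segment: emit each chain-code digit straight from the
--     # Bresenham step decision (counted loop over the driving-axis span); no
--     # intermediate point list and no second differencing scan.
--     result = ''
--     for i in range(len(x_values) - 1):
--         x1, y1 = x_values[i], y_values[i]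
--         x2, y2 = x_values[i + 1], y_values[i + 1]
--         xdif = x2 - x1
--         ydif = y2 - y1
--         dx = abs(xdif)
--         dy = abs(ydif)
--         xs = 1 if xdif > 0 else -1
--         ys = 1 if ydif > 0 else -1
--         diag = str(codeList[3 * ys + xs + 4])
--         if dx > dy:
--             straight = str(codeList[xs + 4])
--             p = 2 * dy - dx
--             for _ in range(dx):
--                 if p >= 0:
--                     result += diag
--                     p += 2 * dy - 2 * dx
--                 else:
--                     result += straight
--                     p += 2 * dy
--         else:
--             straight = str(codeList[3 * ys + 4])
--             p = 2 * dx - dy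
--             for _ in range(dy):
--                 if p >= 0:
--                     result += diag
--                     p += 2 * dx - 2 * dy
--                 else:
--                     result += straight
--                     p += 2 * dx
--     return result
-- ===== Notes on version B (the rewrite author's own statement) =====
-- stated objective: faster
-- what changed: B fuses the Bresenham point-list construction and the chain-code differencing pass into one counted walk per segment that emits each code digit directly from the step decision, instead of building the full point list, re-scanning adjacent pairs, and joining a generator of str() calls.
import Mathlib
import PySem

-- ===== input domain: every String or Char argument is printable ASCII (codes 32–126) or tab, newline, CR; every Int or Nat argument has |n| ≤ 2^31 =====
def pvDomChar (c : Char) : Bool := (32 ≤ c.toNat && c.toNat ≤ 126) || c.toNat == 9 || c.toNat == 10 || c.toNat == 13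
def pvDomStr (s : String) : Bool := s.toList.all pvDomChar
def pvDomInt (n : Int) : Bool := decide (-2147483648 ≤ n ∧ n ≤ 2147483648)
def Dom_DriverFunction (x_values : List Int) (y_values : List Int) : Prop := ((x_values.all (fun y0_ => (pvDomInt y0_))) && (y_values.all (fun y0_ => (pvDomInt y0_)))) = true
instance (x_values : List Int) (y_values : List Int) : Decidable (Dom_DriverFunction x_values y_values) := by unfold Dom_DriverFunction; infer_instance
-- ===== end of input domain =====

-- B fuses A's build-point-list-then-rescan into one counted Bresenham walk per segment
-- that emits each code digit directly from the step decision.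

-- ===== PORT A =====
def pvCodeList : List Int := [5, 6, 7, 4, -1, 0, 3, 2, 1]

-- codeList[hashKey]; in every call site the key is in range, the getD 0 only makes it total
def pvGetChainCode (x1 y1 x2 y2 : Int) : Int :=
  (PySem.List.pyGet? pvCodeList (3 * (y2 - y1) + (x2 - x1) + 4)).getD 0

-- generateChainCode: code of each adjacent pair of points
def pvGenCC : List (Int × Int) → List Int
  | a :: b :: rest => pvGetChainCode a.1 a.2 b.1 b.2 :: pvGenCC (b :: rest)
  | _ => []

-- the X-driving while loop of Bresenham2D; fuel = |x2-x1| makes the while total (exact iteration count)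
def pvBresX (fuel : Nat) (x1 y1 x2 xs ys dx dy p : Int) (acc : List (Int × Int)) : List (Int × Int) :=
  match fuel with
  | 0 => acc
  | f + 1 =>
    if x1 = x2 then acc
    else
      if p ≥ 0 then
        pvBresX f (x1 + xs) (y1 + ys) x2 xs ys dx dy (p - 2 * dx + 2 * dy) (acc ++ [(x1 + xs, y1 + ys)])
      else
        pvBresX f (x1 + xs) y1 x2 xs ys dx dy (p + 2 * dy) (acc ++ [(x1 + xs, y1)])

-- the Y-driving while loop
def pvBresY (fuel : Nat) (x1 y1 y2 xs ys dx dy p : Int) (acc : List (Int × Int)) : List (Int × Int) :=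
  match fuel with
  | 0 => acc
  | f + 1 =>
    if y1 = y2 then acc
    else
      if p ≥ 0 then
        pvBresY f (x1 + xs) (y1 + ys) y2 xs ys dx dy (p - 2 * dy + 2 * dx) (acc ++ [(x1 + xs, y1 + ys)])
      else
        pvBresY f x1 (y1 + ys) y2 xs ys dx dy (p + 2 * dx) (acc ++ [(x1, y1 + ys)])

def pvBresenham (x1 y1 x2 y2 : Int) : List (Int × Int) :=
  let xdif := x2 - x1
  let ydif := y2 - y1
  let dx := |xdif|
  let dy := |ydif|
  let xs : Int := if xdif > 0 then 1 else -1
  let ys : Int := if ydif > 0 then 1 else -1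
  if dx > dy then
    pvBresX dx.toNat x1 y1 x2 xs ys dx dy (2 * dy - dx) [(x1, y1)]
  else
    pvBresY dy.toNat x1 y1 y2 xs ys dx dy (2 * dx - dy) [(x1, y1)]

-- "".join(str(e) for e in chainCode)
def pvJoin (cs : List Int) : String :=
  cs.foldl (fun r e => r ++ PySem.Int.toStr e) ""

def DriverFunction (x_values : List Int) (y_values : List Int) : String :=
  (PySem.List.pyRange 0 ((x_values.length : Int) - 1) 1).foldl
    (fun result i =>
      result ++ pvJoin (pvGenCC (pvBresenham
        (PySem.List.pyGetD x_values i 0) (PySem.List.pyGetD y_values i 0)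
        (PySem.List.pyGetD x_values (i + 1) 0) (PySem.List.pyGetD y_values (i + 1) 0)))) ""

-- ===== PORT B =====
-- the counted per-segment walk: n steps, p-update p+step-drop on the diagonal branch
def pvBLoop (n : Nat) (p step drop : Int) (diag straight result : String) : String :=
  match n with
  | 0 => result
  | m + 1 =>
    if p ≥ 0 then pvBLoop m (p + step - drop) step drop diag straight (result ++ diag)
    else pvBLoop m (p + step) step drop diag straight (result ++ straight)

def DriverFunction_alt (x_values : List Int) (y_values : List Int) : String :=
  (PySem.List.pyRange 0 ((x_values.length : Int) - 1) 1).foldl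
    (fun result i =>
      let x1 := PySem.List.pyGetD x_values i 0
      let y1 := PySem.List.pyGetD y_values i 0
      let x2 := PySem.List.pyGetD x_values (i + 1) 0
      let y2 := PySem.List.pyGetD y_values (i + 1) 0
      let xdif := x2 - x1
      let ydif := y2 - y1
      let dx := |xdif|
      let dy := |ydif|
      let xs : Int := if xdif > 0 then 1 else -1
      let ys : Int := if ydif > 0 then 1 else -1
      let diag := PySem.Int.toStr ((PySem.List.pyGet? pvCodeList (3 * ys + xs + 4)).getD 0)
      if dx > dy then
        pvBLoop dx.toNat (2 * dy - dx) (2 * dy) (2 * dx) diag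
          (PySem.Int.toStr ((PySem.List.pyGet? pvCodeList (xs + 4)).getD 0)) result
      else
        pvBLoop dy.toNat (2 * dx - dy) (2 * dx) (2 * dy) diag
          (PySem.Int.toStr ((PySem.List.pyGet? pvCodeList (3 * ys + 4)).getD 0)) result) ""

-- ===== PRECONDITION & SPEC =====
-- A indexes y_values up to len(x_values)-1; Pre_ excludes exactly the IndexError case
-- (at least two x's with y_values shorter), where A — and B alike — raise IndexError.
def Pre_DriverFunction (x_values : List Int) (y_values : List Int) : Prop :=
  x_values.length ≤ 1 ∨ x_values.length ≤ y_values.length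
instance (x_values : List Int) (y_values : List Int) : Decidable (Pre_DriverFunction x_values y_values) := by unfold Pre_DriverFunction; infer_instance

def pvWitness_DriverFunction : List Int × List Int := ([0, 3, 3], [0, 2, 5])

def Spec_DriverFunction (x_values : List Int) (y_values : List Int) (out : String) : Prop := out = DriverFunction_alt x_values y_values
instance (x_values : List Int) (y_values : List Int) (out : String) : Decidable (Spec_DriverFunction x_values y_values out) := by unfold Spec_DriverFunction; infer_instance

-- ===== CLAIM (what is proved, stated in full; the proofs are below) =====
def Claim_equal_DriverFunction : Prop := ∀ (x_values : List Int) (y_values : List Int), Dom_DriverFunction x_values y_values → Pre_DriverFunction x_values y_values → Spec_DriverFunction x_values y_values (DriverFunction x_values y_values)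

-- ===== LEMMAS AND PROOFS =====

-- cons-form of the X-driving loop (proof-side)
def pvBresXc (f : Nat) (x1 y1 xs ys dx dy p : Int) : List (Int × Int) :=
  match f with
  | 0 => []
  | g + 1 =>
    if p ≥ 0 then (x1 + xs, y1 + ys) :: pvBresXc g (x1 + xs) (y1 + ys) xs ys dx dy (p - 2 * dx + 2 * dy)
    else (x1 + xs, y1) :: pvBresXc g (x1 + xs) y1 xs ys dx dy (p + 2 * dy)

def pvBresYc (f : Nat) (x1 y1 xs ys dx dy p : Int) : List (Int × Int) :=
  match f with
  | 0 => []
  | g + 1 =>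
    if p ≥ 0 then (x1 + xs, y1 + ys) :: pvBresYc g (x1 + xs) (y1 + ys) xs ys dx dy (p - 2 * dy + 2 * dx)
    else (x1, y1 + ys) :: pvBresYc g x1 (y1 + ys) xs ys dx dy (p + 2 * dx)

-- cons-form of B's walk (proof-side)
def pvBlS (n : Nat) (p step drop : Int) (diag straight : String) : String :=
  match n with
  | 0 => ""
  | m + 1 =>
    if p ≥ 0 then diag ++ pvBlS m (p + step - drop) step drop diag straight
    else straight ++ pvBlS m (p + step) step drop diag straight

lemma pvBLoop_acc (n : Nat) (p step drop : Int) (d s r : String) :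
    pvBLoop n p step drop d s r = r ++ pvBlS n p step drop d s := by
  induction n generalizing p r with
  | zero => simp [pvBLoop, pvBlS]
  | succ m ih =>
    simp only [pvBLoop, pvBlS]
    split_ifs <;> rw [ih] <;> rw [String.append_assoc]

lemma pvBresX_eq_cons (f : Nat) (x1 y1 xs ys dx dy p : Int) (acc : List (Int × Int))
    (hxs : xs = 1 ∨ xs = -1) :
    pvBresX f x1 y1 (x1 + xs * f) xs ys dx dy p acc = acc ++ pvBresXc f x1 y1 xs ys dx dy p := by
  induction f generalizing x1 y1 p acc with
  | zero => simp [pvBresX, pvBresXc]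
  | succ g ih =>
    have hx2 : x1 + xs * (((g : Nat) + 1 : Nat) : Int) = (x1 + xs) + xs * (g : Int) := by push_cast; ring
    simp only [pvBresX, pvBresXc, hx2]
    have hne' : x1 ≠ x1 + xs + xs * (g : Int) := by
      intro hc; rcases hxs with h | h <;> rw [h] at hc <;> omega
    rw [if_neg hne']
    split_ifs with hp
    · rw [ih]; simp
    · rw [ih]; simp

lemma pvBresY_eq_cons (f : Nat) (x1 y1 ys xs dx dy p : Int) (acc : List (Int × Int))
    (hys : ys = 1 ∨ ys = -1) :
    pvBresY f x1 y1 (y1 + ys * f) xs ys dx dy p acc = acc ++ pvBresYc f x1 y1 xs ys dx dy p := by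
  induction f generalizing x1 y1 p acc with
  | zero => simp [pvBresY, pvBresYc]
  | succ g ih =>
    have hy2 : y1 + ys * (((g : Nat) + 1 : Nat) : Int) = (y1 + ys) + ys * (g : Int) := by push_cast; ring
    simp only [pvBresY, pvBresYc, hy2]
    have hne' : y1 ≠ y1 + ys + ys * (g : Int) := by
      intro hc; rcases hys with h | h <;> rw [h] at hc <;> omega
    rw [if_neg hne']
    split_ifs with hp
    · rw [ih]; simp
    · rw [ih]; simp

lemma pvJoin_acc (cs : List Int) (r : String) :
    cs.foldl (fun r e => r ++ PySem.Int.toStr e) r = r ++ pvJoin cs := by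
  induction cs generalizing r with
  | nil => simp [pvJoin]
  | cons c cs ih => simp only [pvJoin, List.foldl_cons]; rw [ih, ih (("" : String) ++ _)]; simp [String.append_assoc]

lemma pvJoin_cons (c : Int) (cs : List Int) : pvJoin (c :: cs) = PySem.Int.toStr c ++ pvJoin cs := by
  simp only [pvJoin, List.foldl_cons, String.empty_append]
  exact pvJoin_acc cs (PySem.Int.toStr c)

-- the chain code of one Bresenham step is the code looked up by B
lemma pvStepCode (x1 y1 sx sy : Int) :
    pvGetChainCode x1 y1 (x1 + sx) (y1 + sy) = (PySem.List.pyGet? pvCodeList (3 * sy + sx + 4)).getD 0 := by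
  unfold pvGetChainCode; congr 2; ring

lemma pvStepCodeX (x1 y1 sx : Int) :
    pvGetChainCode x1 y1 (x1 + sx) y1 = (PySem.List.pyGet? pvCodeList (sx + 4)).getD 0 := by
  unfold pvGetChainCode; congr 2; ring

lemma pvStepCodeY (x1 y1 sy : Int) :
    pvGetChainCode x1 y1 x1 (y1 + sy) = (PySem.List.pyGet? pvCodeList (3 * sy + 4)).getD 0 := by
  unfold pvGetChainCode; congr 2; ring

-- key lemma, X-driving: join of the chain codes of the point trail = B's fused walk
lemma pvKeyX (f : Nat) (x1 y1 xs ys dx dy p : Int) :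
    pvJoin (pvGenCC ((x1, y1) :: pvBresXc f x1 y1 xs ys dx dy p)) =
      pvBlS f p (2 * dy) (2 * dx)
        (PySem.Int.toStr ((PySem.List.pyGet? pvCodeList (3 * ys + xs + 4)).getD 0))
        (PySem.Int.toStr ((PySem.List.pyGet? pvCodeList (xs + 4)).getD 0)) := by
  induction f generalizing x1 y1 p with
  | zero => simp [pvBresXc, pvGenCC, pvBlS, pvJoin]
  | succ g ih =>
    simp only [pvBresXc, pvBlS]
    split_ifs with hp
    · simp only [pvGenCC, pvJoin_cons, ih]
      rw [show p - 2 * dx + 2 * dy = p + 2 * dy - 2 * dx from by ring, pvStepCode]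
    · simp only [pvGenCC, pvJoin_cons, ih, pvStepCodeX]

lemma pvKeyY (f : Nat) (x1 y1 xs ys dx dy p : Int) :
    pvJoin (pvGenCC ((x1, y1) :: pvBresYc f x1 y1 xs ys dx dy p)) =
      pvBlS f p (2 * dx) (2 * dy)
        (PySem.Int.toStr ((PySem.List.pyGet? pvCodeList (3 * ys + xs + 4)).getD 0))
        (PySem.Int.toStr ((PySem.List.pyGet? pvCodeList (3 * ys + 4)).getD 0)) := by
  induction f generalizing x1 y1 p with
  | zero => simp [pvBresYc, pvGenCC, pvBlS, pvJoin]
  | succ g ih =>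
    simp only [pvBresYc, pvBlS]
    split_ifs with hp
    · simp only [pvGenCC, pvJoin_cons, ih]
      rw [show p - 2 * dy + 2 * dx = p + 2 * dx - 2 * dy from by ring, pvStepCode]
    · simp only [pvGenCC, pvJoin_cons, ih, pvStepCodeY]

-- segment lemma, X-driving form with symbolic xs/ys
lemma pvSegX (f : Nat) (x1 y1 x2 xs ys dx dy p : Int) (r : String)
    (hxs : xs = 1 ∨ xs = -1) (hx2 : x2 = x1 + xs * (f : Int)) :
    r ++ pvJoin (pvGenCC (pvBresX f x1 y1 x2 xs ys dx dy p [(x1, y1)])) =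
      pvBLoop f p (2 * dy) (2 * dx)
        (PySem.Int.toStr ((PySem.List.pyGet? pvCodeList (3 * ys + xs + 4)).getD 0))
        (PySem.Int.toStr ((PySem.List.pyGet? pvCodeList (xs + 4)).getD 0)) r := by
  subst hx2
  rw [pvBresX_eq_cons f x1 y1 xs ys dx dy p _ hxs, List.singleton_append, pvKeyX, pvBLoop_acc]

lemma pvSegY (f : Nat) (x1 y1 y2 xs ys dx dy p : Int) (r : String)
    (hys : ys = 1 ∨ ys = -1) (hy2 : y2 = y1 + ys * (f : Int)) :
    r ++ pvJoin (pvGenCC (pvBresY f x1 y1 y2 xs ys dx dy p [(x1, y1)])) =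
      pvBLoop f p (2 * dx) (2 * dy)
        (PySem.Int.toStr ((PySem.List.pyGet? pvCodeList (3 * ys + xs + 4)).getD 0))
        (PySem.Int.toStr ((PySem.List.pyGet? pvCodeList (3 * ys + 4)).getD 0)) r := by
  subst hy2
  rw [pvBresY_eq_cons f x1 y1 ys xs dx dy p _ hys, List.singleton_append, pvKeyY, pvBLoop_acc]

-- per-segment equality: A's build-then-rescan equals B's fused walk (with accumulator r)
lemma pvSeg_eq (x1 y1 x2 y2 : Int) (r : String) :
    r ++ pvJoin (pvGenCC (pvBresenham x1 y1 x2 y2)) =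
      (let xdif := x2 - x1
       let ydif := y2 - y1
       let dx := |xdif|
       let dy := |ydif|
       let xs : Int := if xdif > 0 then 1 else -1
       let ys : Int := if ydif > 0 then 1 else -1
       let diag := PySem.Int.toStr ((PySem.List.pyGet? pvCodeList (3 * ys + xs + 4)).getD 0)
       if dx > dy then
         pvBLoop dx.toNat (2 * dy - dx) (2 * dy) (2 * dx) diag
           (PySem.Int.toStr ((PySem.List.pyGet? pvCodeList (xs + 4)).getD 0)) r
       else
         pvBLoop dy.toNat (2 * dx - dy) (2 * dx) (2 * dy) diag
           (PySem.Int.toStr ((PySem.List.pyGet? pvCodeList (3 * ys + 4)).getD 0)) r) := by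
  unfold pvBresenham
  dsimp only
  split_ifs
  all_goals first
    | (refine pvSegX _ _ _ _ _ _ _ _ _ _ (by norm_num) ?_
       rw [Int.toNat_of_nonneg (abs_nonneg _)]
       rcases abs_cases (x2 - x1) with ⟨e1, e2⟩ | ⟨e1, e2⟩ <;> omega)
    | (refine pvSegY _ _ _ _ _ _ _ _ _ _ (by norm_num) ?_
       rw [Int.toNat_of_nonneg (abs_nonneg _)]
       rcases abs_cases (y2 - y1) with ⟨e1, e2⟩ | ⟨e1, e2⟩ <;> omega)

theorem DriverFunction_spec : Claim_equal_DriverFunction := by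
  intro xs ys _ _
  unfold Spec_DriverFunction DriverFunction DriverFunction_alt
  apply PySem.List.foldl_congr_mem
  intro acc i _
  exact pvSeg_eq _ _ _ _ acc
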